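-- pv_equiv track=rewrite | github.com/e-dog/dasVulkan | generate.py | is_descendant_type
-- ===== SOURCE A (Python) =====
-- def is_descendant_type(types, name, base):
--   if name == base:
--     return True
--   type = types.get(name)
--   if not type:
--     return False
--   parents = type.get('parent')
--   if not parents:
--     return False
--   return any([is_descendant_type(types, parent, base) for parent in parents.split(',')])
-- ===== SOURCE B (Python) =====
-- def _parents(types, n):
--     t = types.get(n)
--     if not t:
--         return []
--     p = t.get('parent')
--     if not p:
--         return []
--     return p.split(',')
--
--
-- def is_descendant_type(types, name, base):
--     # iterative frontier/reached-set expansion over the parent graph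
--     # instead of A's recursive path enumeration
--     frontier = {name}
--     reach = {name}
--     for _ in range(len(types)):
--         nxt = set()
--         for n in frontier:
--             nxt.update(_parents(types, n))
--         reach |= nxt
--         frontier = nxt
--     return base in reach
-- ===== Notes on version B (the rewrite author's own statement) =====
-- stated objective: alternative
-- what changed: A enumerates ancestor paths by naive recursion; B instead runs an iterative frontier/reached-set expansion over the parent graph for len(types) rounds and tests membership of base, which also terminates on cyclic inputs where A recurses forever.
import Mathlib
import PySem

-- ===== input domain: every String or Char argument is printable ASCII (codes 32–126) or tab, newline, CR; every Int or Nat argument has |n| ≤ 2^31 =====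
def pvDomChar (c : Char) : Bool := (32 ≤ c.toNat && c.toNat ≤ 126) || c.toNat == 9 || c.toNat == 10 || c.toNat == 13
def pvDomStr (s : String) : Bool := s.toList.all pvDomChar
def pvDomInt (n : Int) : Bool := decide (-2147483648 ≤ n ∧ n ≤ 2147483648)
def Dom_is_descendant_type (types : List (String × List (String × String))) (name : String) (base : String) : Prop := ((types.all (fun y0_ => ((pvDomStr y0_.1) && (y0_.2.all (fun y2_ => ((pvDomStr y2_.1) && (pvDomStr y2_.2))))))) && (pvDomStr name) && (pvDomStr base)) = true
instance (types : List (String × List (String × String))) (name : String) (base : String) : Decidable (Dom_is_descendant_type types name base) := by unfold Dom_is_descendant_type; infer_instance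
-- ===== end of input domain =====

-- B replaces A's recursive path enumeration by an iterative frontier/reached-set
-- expansion over the parent graph (len(types) rounds); same value on all of Pre_.

-- ===== PORT A =====
-- Python A is plain recursion; on the acyclic inputs admitted by Pre_ its
-- recursion depth is at most types.length + 1, so the port carries that much fuel.
def isDescFuel (types : List (String × List (String × String))) (base : String) : Nat → String → Bool
  | 0, _ => false
  | fuel+1, name =>
    if name == base then true
    else
      match (PySem.Dict.mk types).get? name with
      | none => false
      | some t =>
        if t.isEmpty then false
        else
          match (PySem.Dict.mk t).get? "parent" with
          | none => false
          | some parents =>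
            if parents == "" then false
            else (((PySem.Str.split? parents ",").getD []).map
                    (fun parent => isDescFuel types base fuel parent)).any id

def is_descendant_type (types : List (String × List (String × String))) (name : String) (base : String) : Bool :=
  isDescFuel types base (types.length + 1) name

-- ===== PORT B =====
-- helper _parents of Source B (also used by Pre_ below to state acyclicity)
def parentsOf (types : List (String × List (String × String))) (n : String) : List String :=
  match (PySem.Dict.mk types).get? n with
  | none => []
  | some t =>
    if t.isEmpty then []
    else
      match (PySem.Dict.mk t).get? "parent" with
      | none => []
      | some p => if p == "" then [] else (PySem.Str.split? p ",").getD []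

-- body of Source B's inner 'for n in frontier: nxt.update(_parents(types, n))'
def altStep (types : List (String × List (String × String))) (frontier : PySem.Set String) : PySem.Set String :=
  frontier.foldl (fun nxt n => PySem.Set.update nxt (parentsOf types n)) PySem.Set.empty

def is_descendant_type_alt (types : List (String × List (String × String))) (name : String) (base : String) : Bool :=
  let init : PySem.Set String := PySem.Set.ofList [name]
  let st := (List.range types.length).foldl
    (fun (st : PySem.Set String × PySem.Set String) _ =>
      let nxt := altStep types st.2
      (PySem.Set.union st.1 nxt, nxt))
    (init, init)
  PySem.Set.contains st.1 base

-- ===== PRECONDITION & SPEC =====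
-- parent successors as A explores them: base stops the recursion
def pvSuccsCut (types : List (String × List (String × String))) (base : String) (n : String) : List String :=
  if n = base then [] else parentsOf types n

-- bounded closure of pvSuccsCut, used only to state where A terminates
def pvClosure (types : List (String × List (String × String))) (base : String) (s : List String) : Nat → List String
  | 0 => PySem.Set.ofList s
  | k+1 =>
    let r := pvClosure types base s k
    PySem.Set.update r (r.flatMap (pvSuccsCut types base))

-- Pre_ excludes exactly the inputs on which a parent cycle is reachable from
-- name without being cut by base: there Python A recurses forever
-- (RecursionError); everywhere else A returns normally.
def Pre_is_descendant_type (types : List (String × List (String × String))) (name : String) (base : String) : Prop :=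
  ∀ c ∈ pvClosure types base [name] (types.length + 1),
    c ∉ pvClosure types base (pvSuccsCut types base c) (types.length + 1)
instance (types : List (String × List (String × String))) (name : String) (base : String) : Decidable (Pre_is_descendant_type types name base) := by unfold Pre_is_descendant_type; infer_instance

def pvWitness_is_descendant_type : (List (String × List (String × String))) × String × String :=
  ([("Child", [("parent", "Mid,Other")]), ("Mid", [("parent", "Base")]), ("Base", [])], "Child", "Base")

def Spec_is_descendant_type (types : List (String × List (String × String))) (name : String) (base : String) (out : Bool) : Prop := out = is_descendant_type_alt types name base
instance (types : List (String × List (String × String))) (name : String) (base : String) (out : Bool) : Decidable (Spec_is_descendant_type types name base out) := by unfold Spec_is_descendant_type; infer_instance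

-- ===== CLAIM (what is proved, stated in full; the proofs are below) =====
def Claim_equal_is_descendant_type : Prop := ∀ (types : List (String × List (String × String))) (name : String) (base : String), Dom_is_descendant_type types name base → Pre_is_descendant_type types name base → Spec_is_descendant_type types name base (is_descendant_type types name base)

-- ===== LEMMAS AND PROOFS =====

-- 'there is a parent-chain of length exactly k from a to b'
def StepsN (types : List (String × List (String × String))) : Nat → String → String → Prop
  | 0, a, b => a = b
  | k+1, a, b => ∃ c, c ∈ parentsOf types a ∧ StepsN types k c b

theorem descFuel_succ (types : List (String × List (String × String))) (base : String) (f : Nat) (n : String) :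
    isDescFuel types base (f+1) n
      = ((n == base) || (parentsOf types n).any (isDescFuel types base f)) := by
  simp only [isDescFuel, parentsOf]
  by_cases h : n = base
  · simp [h]
  · simp only [beq_iff_eq, h, if_false]
    cases hg : (PySem.Dict.mk types).get? n with
    | none => simp [h]
    | some t =>
      by_cases ht : t.isEmpty
      · simp [ht, h]
      · simp only [ht, if_false, Bool.false_eq_true]
        cases hp : (PySem.Dict.mk t).get? "parent" with
        | none => simp [h]
        | some p =>
          by_cases hp0 : p = ""
          · simp [hp0, h]
          · simp [hp0, h, List.any_map]

theorem stepsN_snoc (types : List (String × List (String × String))) (k : Nat) (a b : String) :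
    StepsN types (k+1) a b ↔ ∃ c, StepsN types k a c ∧ b ∈ parentsOf types c := by
  induction k generalizing a with
  | zero =>
    constructor
    · rintro ⟨c, hc, hs⟩; exact ⟨a, rfl, by cases hs; exact hc⟩
    · rintro ⟨c, hs, hb⟩; cases hs; exact ⟨b, hb, rfl⟩
  | succ k ih =>
    constructor
    · rintro ⟨c, hc, hs⟩
      obtain ⟨d, hd, hbd⟩ := (ih c).mp hs
      exact ⟨d, ⟨c, hc, hd⟩, hbd⟩
    · rintro ⟨d, ⟨c, hc, hs⟩, hbd⟩
      exact ⟨c, hc, (ih c).mpr ⟨d, hs, hbd⟩⟩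

theorem descFuel_iff (types : List (String × List (String × String))) (base : String) :
    ∀ (f : Nat) (n : String),
      isDescFuel types base f n = true ↔ ∃ j < f, StepsN types j n base := by
  intro f
  induction f with
  | zero => intro n; simp [isDescFuel]
  | succ f ih =>
    intro n
    rw [descFuel_succ]
    simp only [Bool.or_eq_true, beq_iff_eq, List.any_eq_true]
    constructor
    · rintro (h | ⟨c, hc, hcd⟩)
      · exact ⟨0, Nat.succ_pos f, h⟩
      · obtain ⟨j, hj, hs⟩ := (ih c).mp hcd
        exact ⟨j+1, Nat.succ_lt_succ hj, ⟨c, hc, hs⟩⟩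
    · rintro ⟨j, hj, hs⟩
      cases j with
      | zero => exact Or.inl hs
      | succ j =>
        obtain ⟨c, hc, hs'⟩ := hs
        exact Or.inr ⟨c, hc, (ih c).mpr ⟨j, Nat.lt_of_succ_lt_succ hj, hs'⟩⟩

theorem mem_altStep (types : List (String × List (String × String))) (fr : PySem.Set String) (m : String) :
    m ∈ altStep types fr ↔ ∃ c ∈ fr, m ∈ parentsOf types c := by
  unfold altStep
  suffices h : ∀ (l : List String) (acc : PySem.Set String),
      (m ∈ l.foldl (fun nxt n => PySem.Set.update nxt (parentsOf types n)) acc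
        ↔ m ∈ acc ∨ ∃ c ∈ l, m ∈ parentsOf types c) by
    simpa [PySem.Set.empty] using h fr PySem.Set.empty
  intro l
  induction l with
  | nil => simp
  | cons x xs ih =>
    intro acc
    simp [List.foldl_cons, ih, PySem.Set.mem_update, or_assoc]

-- state of Source B's loop after k rounds
def altState (types : List (String × List (String × String))) (name : String) (k : Nat) :
    PySem.Set String × PySem.Set String :=
  (List.range k).foldl
    (fun (st : PySem.Set String × PySem.Set String) _ =>
      let nxt := altStep types st.2
      (PySem.Set.union st.1 nxt, nxt))
    (PySem.Set.ofList [name], PySem.Set.ofList [name])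

theorem altState_mem (types : List (String × List (String × String))) (name : String) :
    ∀ (k : Nat),
      (∀ m, m ∈ (altState types name k).2 ↔ StepsN types k name m) ∧
      (∀ m, m ∈ (altState types name k).1 ↔ ∃ j ≤ k, StepsN types j name m) := by
  intro k
  induction k with
  | zero =>
    constructor
    · intro m
      simp [altState, StepsN, PySem.Set.mem_ofList, eq_comm]
    · intro m
      simp only [altState, List.range_zero, List.foldl_nil, PySem.Set.mem_ofList,
        List.mem_singleton, Nat.le_zero]
      constructor
      · intro h; exact ⟨0, rfl, h.symm⟩
      · rintro ⟨j, rfl, hs⟩; exact hs.symm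
  | succ k ih =>
    have hunf : altState types name (k+1)
        = (PySem.Set.union (altState types name k).1 (altStep types (altState types name k).2),
           altStep types (altState types name k).2) := by
      simp [altState, List.range_succ, List.foldl_append]
    obtain ⟨ih2, ih1⟩ := ih
    constructor
    · intro m
      rw [hunf]
      simp only [stepsN_snoc]
      rw [mem_altStep]
      constructor
      · rintro ⟨c, hc, hm⟩; exact ⟨c, (ih2 c).mp hc, hm⟩
      · rintro ⟨c, hs, hm⟩; exact ⟨c, (ih2 c).mpr hs, hm⟩
    · intro m
      rw [hunf]
      simp only []
      rw [PySem.Set.mem_union, mem_altStep]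
      constructor
      · rintro (h | ⟨c, hc, hm⟩)
        · obtain ⟨j, hj, hs⟩ := (ih1 m).mp h
          exact ⟨j, Nat.le_succ_of_le hj, hs⟩
        · exact ⟨k+1, le_refl _, (stepsN_snoc types k name m).mpr ⟨c, (ih2 c).mp hc, hm⟩⟩
      · rintro ⟨j, hj, hs⟩
        rcases Nat.lt_or_ge j (k+1) with hlt | hge
        · exact Or.inl ((ih1 m).mpr ⟨j, Nat.lt_succ_iff.mp hlt, hs⟩)
        · have hje : j = k+1 := le_antisymm hj hge
          subst hje
          obtain ⟨c, hsc, hm⟩ := (stepsN_snoc types k name m).mp hs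
          exact Or.inr ⟨c, (ih2 c).mpr hsc, hm⟩

theorem alt_eq_altState (types : List (String × List (String × String))) (name base : String) :
    is_descendant_type_alt types name base
      = PySem.Set.contains (altState types name types.length).1 base := rfl

theorem alt_iff (types : List (String × List (String × String))) (name base : String) :
    is_descendant_type_alt types name base = true
      ↔ ∃ j ≤ types.length, StepsN types j name base := by
  rw [alt_eq_altState, PySem.Set.contains_iff]
  exact (altState_mem types name types.length).2 base

-- ===== VERDICT (by name: the statement is the Claim_ definition above) =====
theorem is_descendant_type_spec : Claim_equal_is_descendant_type := by
  intro types name base _hdom _hpre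
  unfold Spec_is_descendant_type is_descendant_type
  rw [Bool.eq_iff_iff, descFuel_iff, alt_iff]
  constructor
  · rintro ⟨j, hj, hs⟩; exact ⟨j, Nat.lt_succ_iff.mp hj, hs⟩
  · rintro ⟨j, hj, hs⟩; exact ⟨j, Nat.lt_succ_iff.mpr hj, hs⟩
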